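-- pv_equiv track=rewrite | github.com/erikblanchard/tictac_py | tictactoe.py | board_rows
-- ===== SOURCE A (Python) =====
-- def board_rows(game_dict, board_size):
--     temp_row = []
--     for row in range(board_size):
--         board_mod = row * board_size
--         list_temp=[]
--         for i, num in enumerate(range(1, board_size+1)):
--             list_temp.append(game_dict[num+board_mod])
--         temp_row.append(list_temp)
--     return temp_row
-- ===== SOURCE B (Python) =====
-- def board_rows(game_dict, board_size):
--     flat = [game_dict[k] for k in range(1, board_size * board_size + 1)]
--     return [flat[r * board_size:(r + 1) * board_size] for r in range(board_size)]
-- ===== Notes on version B (the rewrite author's own statement) =====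
-- stated objective: simpler
-- what changed: B gathers all cell values once in key order into a flat list and then slices that list into rows, replacing A's nested per-cell index-arithmetic loops with one gather pass plus row slicing.
-- outside the precondition, e.g. on board_rows({}, -1): A returns [], B raises KeyError; on board_rows({}, 1): A raises KeyError, B raises KeyError
import Mathlib
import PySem

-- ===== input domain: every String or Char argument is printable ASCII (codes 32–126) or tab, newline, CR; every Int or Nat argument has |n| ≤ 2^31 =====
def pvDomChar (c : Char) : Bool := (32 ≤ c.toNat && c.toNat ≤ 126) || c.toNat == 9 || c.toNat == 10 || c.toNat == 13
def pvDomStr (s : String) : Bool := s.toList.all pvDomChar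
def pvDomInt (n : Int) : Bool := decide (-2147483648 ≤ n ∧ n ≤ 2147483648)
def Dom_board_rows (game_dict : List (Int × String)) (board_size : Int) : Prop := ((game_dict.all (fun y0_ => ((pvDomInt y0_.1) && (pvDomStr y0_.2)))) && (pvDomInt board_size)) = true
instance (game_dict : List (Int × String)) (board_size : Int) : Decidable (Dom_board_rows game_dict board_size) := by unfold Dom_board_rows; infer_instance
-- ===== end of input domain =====

-- ===== PORT A =====
-- B ↔ A equivalence on the natural domain (board_size ≥ 0, all keys 1..board_size² present).
-- Port of A: nested loops; game_dict[k] is rendered with Dict.getD (Pre_ guarantees the key is present,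
-- so the default "" is never produced).
def board_rows (game_dict : List (Int × String)) (board_size : Int) : List (List String) :=
  (PySem.List.pyRange 0 board_size 1).foldl (fun temp_row row =>
    let board_mod := row * board_size
    let list_temp := (PySem.List.pyRange 1 (board_size + 1) 1).foldl
      (fun lt num => lt ++ [PySem.Dict.getD (PySem.Dict.mk game_dict) (num + board_mod) ""]) []
    temp_row ++ [list_temp]) []

-- ===== PORT B =====
-- Port of B: flat gather in key order, then one slice per row.
def board_rows_alt (game_dict : List (Int × String)) (board_size : Int) : List (List String) :=
  let flat := (PySem.List.pyRange 1 (board_size * board_size + 1) 1).map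
    (fun k => PySem.Dict.getD (PySem.Dict.mk game_dict) k "")
  (PySem.List.pyRange 0 board_size 1).map (fun r =>
    PySem.List.slice flat (some (r * board_size)) (some ((r + 1) * board_size)))

-- ===== PRECONDITION & SPEC =====
-- Pre_ restricts to the natural domain: board_size ≥ 0 (on negative sizes A accidentally returns []
-- while B raises KeyError) and every key 1..board_size² present (otherwise A raises KeyError).
-- (board_size² ≤ length is implied by all keys 1..board_size² being present — the distinct keys need
-- distinct entries — and is listed first so the condition evaluates without building a huge range.)
def Pre_board_rows (game_dict : List (Int × String)) (board_size : Int) : Prop :=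
  (decide (0 ≤ board_size) &&
   decide (board_size * board_size ≤ (game_dict.length : Int)) &&
   (PySem.List.pyRange 1 (board_size * board_size + 1) 1).all
     (fun k => ((PySem.Dict.mk game_dict).get? k).isSome)) = true
instance (game_dict : List (Int × String)) (board_size : Int) : Decidable (Pre_board_rows game_dict board_size) := by unfold Pre_board_rows; infer_instance
def pvWitness_board_rows : (List (Int × String)) × Int := ([(1, "X"), (2, "O"), (3, "X"), (4, "O")], 2)

def Spec_board_rows (game_dict : List (Int × String)) (board_size : Int) (out : List (List String)) : Prop := out = board_rows_alt game_dict board_size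
instance (game_dict : List (Int × String)) (board_size : Int) (out : List (List String)) : Decidable (Spec_board_rows game_dict board_size out) := by unfold Spec_board_rows; infer_instance

-- ===== CLAIM (what is proved, stated in full; the proofs are below) =====
def Claim_equal_board_rows : Prop := ∀ (game_dict : List (Int × String)) (board_size : Int), Dom_board_rows game_dict board_size → Pre_board_rows game_dict board_size → Spec_board_rows game_dict board_size (board_rows game_dict board_size)

-- ===== LEMMAS AND PROOFS =====

-- A's outer and inner append-singleton loops are maps.
theorem board_rows_eq_map (game_dict : List (Int × String)) (board_size : Int) :
    board_rows game_dict board_size =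
      (PySem.List.pyRange 0 board_size 1).map (fun row =>
        (PySem.List.pyRange 1 (board_size + 1) 1).map
          (fun num => PySem.Dict.getD (PySem.Dict.mk game_dict) (num + row * board_size) "")) := by
  unfold board_rows
  rw [PySem.List.foldl_append_singleton_eq_map]
  refine List.map_congr_left (fun row _ => ?_)
  dsimp only
  rw [PySem.List.foldl_append_singleton_eq_map]
  exact List.nil_append _

-- Each row slice of the flat gather is the corresponding row of A.
theorem slice_flat_row (g : Int → String) (n r : Nat) (hr : r < n) :
    PySem.List.slice
        (((PySem.List.pyRange 1 ((n : Int) * (n : Int) + 1) 1)).map g)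
        (some ((r : Int) * (n : Int))) (some (((r : Int) + 1) * (n : Int))) =
      (PySem.List.pyRange 1 ((n : Int) + 1) 1).map (fun num => g (num + (r : Int) * (n : Int))) := by
  have hc1 : ((r : Int) * (n : Int)) = (((r * n : Nat) : Int)) := by push_cast; ring
  have hc2 : (((r : Int) + 1) * (n : Int)) = (((r * n : Nat) : Int) + ((n : Nat) : Int)) := by push_cast; ring
  rw [hc1, hc2, PySem.List.slice_natCast_add]
  have hmul : r * n + n ≤ n * n := by nlinarith [hr]
  apply List.ext_getElem
  · simp [PySem.List.length_pyRange_one]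
    omega
  · intro i hi1 hi2
    have hin : i < n := by
      simpa [PySem.List.length_pyRange_one] using hi2
    simp only [List.getElem_take, List.getElem_drop, List.getElem_map,
      PySem.List.getElem_pyRange_one]
    congr 1
    push_cast
    ring

-- ===== VERDICT (by name: the statement is the Claim_ definition above) =====
theorem board_rows_spec : Claim_equal_board_rows := by
  intro game_dict board_size _hDom hPre
  unfold Spec_board_rows
  rw [board_rows_eq_map]
  unfold board_rows_alt
  unfold Pre_board_rows at hPre
  simp only [Bool.and_eq_true, decide_eq_true_eq] at hPre
  obtain ⟨⟨hbs, -⟩, -⟩ := hPre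
  obtain ⟨n, rfl⟩ := Int.eq_ofNat_of_zero_le hbs
  refine (List.map_congr_left ?_).symm
  intro r hr
  rw [PySem.List.mem_pyRange_one] at hr
  obtain ⟨m, rfl⟩ := Int.eq_ofNat_of_zero_le hr.1
  exact slice_flat_row _ n m (by exact_mod_cast hr.2)
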